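-- pv_equiv track=rewrite | github.com/eduardsosh/iqsolver | main.py | get_remaining_pieces
-- ===== SOURCE A (Python) =====
-- all_pieces = {
--     'la' : [['l','l','l'],
--             ['l','0','l']],
--     'lb' : [['l','l','l'],
--             ['l','0','0']],
--     'ga' : [['g','g','g'],
--             ['g','g','0']],
--     'gb' : [['g','g','g'],
--             ['0','g','0']],
--     'pa' : [['p','p','p'],
--             ['0','p','p']],
--     'pb' : [['p','0','0'],
--             ['p','p','p']],
--     'da' : [['d','0','d'],
--             ['d','d','d']],
--     'db' : [['d','d','d'],
--             ['0','d','0']],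
--     'ya' : [['y','y','y','y'],
--             ['0','0','y','y']],
--     'yb' : [['y','0','0','0'],
--             ['y','y','y','y']],
--     'oa' : [['o','o','o','o'],
--             ['o','0','o','0']],
--     'ob' : [['o','o','o','o'],
--             ['0','o','0','0']],
--     'ra' : [['r','r','r','r'],
--             ['r','0','0','0']],
--     'rb' : [['r','r','r','r'],
--             ['r','0','0','r']],
--     'ia' : [['i','i','i','i'],
--             ['i','i','0','0']],
--     'ib' : [['i','i','i','i'],
--             ['0','0','i','0']],
--     'ba' : [['b','0','b','0'],
--             ['b','b','b','b']],
--     'bb' : [['b','b','b','b'],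
--             ['b','0','0','0']],
--     'ca' : [['c','c','c','c'],
--             ['0','c','c','0']],
--     'cb' : [['c','c','c','c'],
--             ['0','c','0','0']],
-- }
--
-- def get_remaining_pieces(board):
--     used_pieces = []
--     for row in board:
--         for cell in row:
--             if cell not in used_pieces and cell != '0':
--                 used_pieces.append(cell)
--
--     remaining_pieces = [key for key in all_pieces.keys() if key[0] not in used_pieces]
--
--     return remaining_pieces
-- ===== SOURCE B (Python) =====
-- all_pieces = {
--     'la' : [['l','l','l'],
--             ['l','0','l']],
--     'lb' : [['l','l','l'],
--             ['l','0','0']],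
--     'ga' : [['g','g','g'],
--             ['g','g','0']],
--     'gb' : [['g','g','g'],
--             ['0','g','0']],
--     'pa' : [['p','p','p'],
--             ['0','p','p']],
--     'pb' : [['p','0','0'],
--             ['p','p','p']],
--     'da' : [['d','0','d'],
--             ['d','d','d']],
--     'db' : [['d','d','d'],
--             ['0','d','0']],
--     'ya' : [['y','y','y','y'],
--             ['0','0','y','y']],
--     'yb' : [['y','0','0','0'],
--             ['y','y','y','y']],
--     'oa' : [['o','o','o','o'],
--             ['o','0','o','0']],
--     'ob' : [['o','o','o','o'],
--             ['0','o','0','0']],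
--     'ra' : [['r','r','r','r'],
--             ['r','0','0','0']],
--     'rb' : [['r','r','r','r'],
--             ['r','0','0','r']],
--     'ia' : [['i','i','i','i'],
--             ['i','i','0','0']],
--     'ib' : [['i','i','i','i'],
--             ['0','0','i','0']],
--     'ba' : [['b','0','b','0'],
--             ['b','b','b','b']],
--     'bb' : [['b','b','b','b'],
--             ['b','0','0','0']],
--     'ca' : [['c','c','c','c'],
--             ['0','c','c','0']],
--     'cb' : [['c','c','c','c'],
--             ['0','c','0','0']],
-- }
--
-- def get_remaining_pieces(board):
--     return [key for key in all_pieces.keys()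
--             if not any(cell == key[0] for row in board for cell in row)]
-- ===== Notes on version B (the rewrite author's own statement) =====
-- stated objective: faster
-- what changed: Drops A's used-letter collection phase (a list with an O(U) 'not in' scan per cell) and instead, per fixed dict key, scans the board directly for the key's color letter, valid because key[0] is never '0'.
import Mathlib
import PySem

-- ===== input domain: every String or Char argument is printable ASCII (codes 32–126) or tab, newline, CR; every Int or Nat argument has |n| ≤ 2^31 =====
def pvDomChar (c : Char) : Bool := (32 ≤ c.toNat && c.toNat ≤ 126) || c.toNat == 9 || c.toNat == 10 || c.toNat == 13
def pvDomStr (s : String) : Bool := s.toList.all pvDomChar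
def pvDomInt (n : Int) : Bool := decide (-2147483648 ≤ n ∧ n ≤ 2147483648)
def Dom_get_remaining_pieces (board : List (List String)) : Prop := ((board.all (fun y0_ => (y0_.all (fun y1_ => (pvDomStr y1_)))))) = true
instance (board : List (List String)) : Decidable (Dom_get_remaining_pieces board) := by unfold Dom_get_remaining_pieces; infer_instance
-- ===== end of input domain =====

-- B drops A's used-letter collection phase and instead scans the board per dict key (simpler decomposition; same return value).

-- ===== PORT A =====
-- the keys of the module constant all_pieces, in dict insertion order
def pvKeys : List String :=
  ["la","lb","ga","gb","pa","pb","da","db","ya","yb",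
   "oa","ob","ra","rb","ia","ib","ba","bb","ca","cb"]

-- key[0]; every key is a two-letter literal so the IndexError case never occurs
def pvFirst (k : String) : String := ((PySem.Str.pyGet? k 0).map (fun c => String.ofList [c])).getD ""

def get_remaining_pieces (board : List (List String)) : List String :=
  let used_pieces : List String :=
    board.foldl (fun acc row =>
      row.foldl (fun acc cell =>
        if cell ∉ acc ∧ cell ≠ "0" then acc ++ [cell] else acc) acc) []
  pvKeys.filter (fun key => !(used_pieces.contains (pvFirst key)))

-- ===== PORT B =====
def get_remaining_pieces_alt (board : List (List String)) : List String :=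
  pvKeys.filter (fun key =>
    !(board.any (fun row => row.any (fun cell => cell == pvFirst key))))

-- ===== PRECONDITION & SPEC =====
def Spec_get_remaining_pieces (board : List (List String)) (out : List String) : Prop := out = get_remaining_pieces_alt board
instance (board : List (List String)) (out : List String) : Decidable (Spec_get_remaining_pieces board out) := by unfold Spec_get_remaining_pieces; infer_instance

-- ===== CLAIM (what is proved, stated in full; the proofs are below) =====
def Claim_equal_get_remaining_pieces : Prop := ∀ (board : List (List String)), Dom_get_remaining_pieces board → Spec_get_remaining_pieces board (get_remaining_pieces board)

-- ===== LEMMAS AND PROOFS =====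

-- membership in the inner (row) accumulation loop of A
theorem pv_mem_rowFold (x : String) (row acc : List String) :
    (x ∈ row.foldl (fun acc cell =>
        if cell ∉ acc ∧ cell ≠ "0" then acc ++ [cell] else acc) acc)
      ↔ x ∈ acc ∨ (x ∈ row ∧ x ≠ "0") := by
  induction row generalizing acc with
  | nil => simp
  | cons c cs ih =>
    simp only [List.foldl_cons, ih]
    by_cases hc : c ∉ acc ∧ c ≠ "0"
    · simp only [if_pos hc, List.mem_append, List.mem_cons]
      constructor
      · rintro ((h | rfl | h) | ⟨h, hne⟩)
        · tauto
        · exact Or.inr ⟨Or.inl rfl, hc.2⟩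
        · simp at h
        · tauto
      · rintro (h | ⟨(rfl | h), hne⟩) <;> tauto
    · simp only [if_neg hc, List.mem_cons]
      push Not at hc
      constructor
      · tauto
      · rintro (h | ⟨(rfl | h), hne⟩)
        · tauto
        · exact Or.inl (by_contra fun hm => hne (hc hm))
        · tauto

-- membership in A's used_pieces list
theorem pv_mem_used (x : String) (board : List (List String)) (acc : List String) :
    (x ∈ board.foldl (fun acc row =>
        row.foldl (fun acc cell =>
          if cell ∉ acc ∧ cell ≠ "0" then acc ++ [cell] else acc) acc) acc)
      ↔ x ∈ acc ∨ (∃ row ∈ board, x ∈ row) ∧ x ≠ "0" := by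
  induction board generalizing acc with
  | nil => simp
  | cons r rs ih =>
    simp only [List.foldl_cons, ih, pv_mem_rowFold]
    constructor
    · rintro ((h | ⟨h1, h2⟩) | ⟨⟨row, hr, hx⟩, hne⟩)
      · exact Or.inl h
      · exact Or.inr ⟨⟨r, by simp, h1⟩, h2⟩
      · exact Or.inr ⟨⟨row, by simp [hr], hx⟩, hne⟩
    · rintro (h | ⟨⟨row, hr, hx⟩, hne⟩)
      · exact Or.inl (Or.inl h)
      · rcases List.mem_cons.mp hr with rfl | hr
        · exact Or.inl (Or.inr ⟨hx, hne⟩)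
        · exact Or.inr ⟨⟨row, hr, hx⟩, hne⟩

-- every key's first letter is a color letter, never "0"
theorem pv_first_ne_zero : ∀ k ∈ pvKeys, pvFirst k ≠ "0" := by decide

-- ===== VERDICT (by name: the statement is the Claim_ definition above) =====
theorem get_remaining_pieces_spec : Claim_equal_get_remaining_pieces := by
  intro board _
  unfold Spec_get_remaining_pieces get_remaining_pieces get_remaining_pieces_alt
  apply List.filter_congr
  intro k hk
  have h0 := pv_first_ne_zero k hk
  congr 1
  rw [Bool.eq_iff_iff]
  simp only [List.contains_iff_mem, List.any_eq_true, beq_iff_eq, pv_mem_used]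
  constructor
  · rintro (h | ⟨⟨row, hr, hx⟩, _⟩)
    · simp at h
    · exact ⟨row, hr, pvFirst k, hx, rfl⟩
  · rintro ⟨row, hr, cell, hc, rfl⟩
    exact Or.inr ⟨⟨row, hr, hc⟩, h0⟩
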